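-- pv_equiv track=rewrite | github.com/BearTools/MMVD | mmvdApp/charts.py | gantt_values
-- ===== SOURCE A (Python) =====
-- def gantt_values(states, dropzone):
--     """
--     Generate data for each robot from given list of states that is later fed
--     to Gantt chart generating function :func:`gantt_chart()`.
--
--     :param list states: complete solution states
--     :param tuple dropzone: drop zone coordinates
--     :return: data that helps generating Gantt chart
--     :rtype: dict
--     """
--     # robot: [(start_index, stop_index, product)]
--     data = {robot: [] for robot in range(len(states[0]))}
--
--     for index, state in enumerate(states):
--
--         for robot, pos_y, pos_x, product in state:
--             if (pos_y, pos_x) == dropzone: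
--                 # close if possible
--                 if len(data[robot]) and not data[robot][-1][1]:
--                     data[robot][-1][1] = index
--
--             else:
--                 if not len(data[robot]) or (len(data[robot]) and
--                                             data[robot][-1][1]):
--                     # start new
--                     data[robot].append([index, None, product])
--                 else:
--                     # update product
--                     data[robot][-1][2] = product
--
--     return data
-- ===== SOURCE B (Python) =====
-- def gantt_values(states, dropzone):
--     """Transpose-first rewrite: group each robot's (index, y, x, product)
--     events, then build that robot's intervals with an explicit open-interval
--     accumulator instead of mutating the tail of a shared dict of lists."""
--     n = len(states[0])
--     events = {robot: [] for robot in range(n)}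
--     for index, state in enumerate(states):
--         for robot, pos_y, pos_x, product in state:
--             events[robot].append((index, pos_y, pos_x, product))
--
--     data = {}
--     for robot in range(n):
--         done = []
--         cur = None  # open/last interval: [start, stop, product]
--         for index, pos_y, pos_x, product in events[robot]:
--             if (pos_y, pos_x) == dropzone:
--                 if cur is not None and not cur[1]:
--                     cur = [cur[0], index, cur[2]]
--             else:
--                 if cur is None or cur[1]:
--                     if cur is not None:
--                         done.append(cur)
--                     cur = [index, None, product]
--                 else:
--                     cur = [cur[0], cur[1], product]
--         data[robot] = done + ([cur] if cur is not None else [])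
--     return data
-- ===== Notes on version B (the rewrite author's own statement) =====
-- stated objective: alternative
-- what changed: Instead of one interleaved time pass that mutates the tail of each robot's list inside a shared dict, B first transposes the states into per-robot event lists and then builds each robot's intervals independently with an explicit (done, current-interval) accumulator.
import Mathlib
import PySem

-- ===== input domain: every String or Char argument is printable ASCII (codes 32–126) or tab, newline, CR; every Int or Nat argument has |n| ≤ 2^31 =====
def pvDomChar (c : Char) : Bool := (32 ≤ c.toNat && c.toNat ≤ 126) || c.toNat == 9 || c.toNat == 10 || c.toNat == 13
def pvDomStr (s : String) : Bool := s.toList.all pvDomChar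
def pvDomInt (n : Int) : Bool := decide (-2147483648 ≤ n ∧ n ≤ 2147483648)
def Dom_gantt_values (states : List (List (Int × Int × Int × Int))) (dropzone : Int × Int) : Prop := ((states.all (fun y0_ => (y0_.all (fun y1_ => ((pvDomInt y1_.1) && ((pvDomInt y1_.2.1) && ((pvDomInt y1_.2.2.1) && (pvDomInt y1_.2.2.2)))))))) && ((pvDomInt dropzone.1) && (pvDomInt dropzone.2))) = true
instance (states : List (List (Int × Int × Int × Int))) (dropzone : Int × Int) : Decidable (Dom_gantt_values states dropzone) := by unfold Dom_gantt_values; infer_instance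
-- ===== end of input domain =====

-- B reorganises A's single interleaved time pass into a transpose (per-robot event lists)
-- followed by an independent per-robot interval build with an explicit (done, current) accumulator;
-- equivalence is proved on all inputs where the Python A returns (Pre_: nonempty states, robot ids in range).

-- ===== PORT A =====
-- Python truthiness of an int-or-None cell ('not data[robot][-1][1]'): None and 0 are falsy.
def pvTruthy (o : Option Int) : Bool := match o with | none => false | some v => v != 0

-- in-place mutation of the last element of a Python list ('data[robot][-1][...] = ...');
-- A only reaches it with a nonempty list, where this is exact.
def pvSetLast {α : Type} (l : List α) (f : α → α) : List α :=
  match l with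
  | [] => []
  | [a] => [f a]
  | a :: b :: t => a :: pvSetLast (b :: t) f

-- the body of A's inner loop, acting on data[robot] (the inner length-3 lists use List.set,
-- exact since every stored list has length 3)
def pvStepA (dropzone : Int × Int) (index : Int) (e : Int × Int × Int)
    (l : List (List (Option Int))) : List (List (Option Int)) :=
  if (e.1, e.2.1) = dropzone then
    if l.length ≠ 0 ∧ pvTruthy (PySem.List.pyGetD (PySem.List.pyGetD l (-1) []) 1 none) = false then
      pvSetLast l (fun w => w.set 1 (some index))
    else l
  else
    if l.length = 0 ∨ (l.length ≠ 0 ∧ pvTruthy (PySem.List.pyGetD (PySem.List.pyGetD l (-1) []) 1 none) = true) then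
      l ++ [[some index, none, some e.2.2]]
    else
      pvSetLast l (fun w => w.set 2 (some e.2.2))

-- on a robot id missing from the dict the Python raises KeyError (excluded by Pre_);
-- there Dict.modify inserts instead, which Pre_ puts outside the claim.
def gantt_values (states : List (List (Int × Int × Int × Int))) (dropzone : Int × Int) :
    List (Int × List (List (Option Int))) :=
  let data : PySem.Dict Int (List (List (Option Int))) :=
    (PySem.List.pyRange 0 ((PySem.List.pyGetD states 0 []).length : Int) 1).foldl
      (fun d robot => d.insert robot []) PySem.Dict.empty
  let data := (PySem.List.enumerate states).foldl
    (fun d p => p.2.foldl (fun d e => d.modify e.1 [] (pvStepA dropzone p.1 e.2)) d) data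
  data.items

-- ===== PORT B =====
def pvCurList (c : Int × Option Int × Int) : List (Option Int) := [some c.1, c.2.1, some c.2.2]

def pvOpt (c : Option (Int × Option Int × Int)) : List (List (Option Int)) :=
  match c with | some c => [pvCurList c] | none => []

-- B's per-event step on (done intervals, current interval); ev = (index, pos_y, pos_x, product)
def pvStepB (dropzone : Int × Int)
    (s : List (List (Option Int)) × Option (Int × Option Int × Int))
    (ev : Int × Int × Int × Int) :
    List (List (Option Int)) × Option (Int × Option Int × Int) :=
  if (ev.2.1, ev.2.2.1) = dropzone then
    match s.2 with
    | none => s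
    | some c => if pvTruthy c.2.1 = false then (s.1, some (c.1, some ev.1, c.2.2)) else s
  else
    match s.2 with
    | none => (s.1, some (ev.1, none, ev.2.2.2))
    | some c =>
      if pvTruthy c.2.1 = true then (s.1 ++ [pvCurList c], some (ev.1, none, ev.2.2.2))
      else (s.1, some (c.1, c.2.1, ev.2.2.2))

def pvRow (dropzone : Int × Int) (l : List (Int × Int × Int × Int)) : List (List (Option Int)) :=
  let s := l.foldl (pvStepB dropzone) ([], none)
  s.1 ++ pvOpt s.2

def gantt_values_alt (states : List (List (Int × Int × Int × Int))) (dropzone : Int × Int) :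
    List (Int × List (List (Option Int))) :=
  let n : Int := ((PySem.List.pyGetD states 0 []).length : Int)
  let events : PySem.Dict Int (List (Int × Int × Int × Int)) :=
    (PySem.List.pyRange 0 n 1).foldl (fun d robot => d.insert robot []) PySem.Dict.empty
  let events := (PySem.List.enumerate states).foldl
    (fun d p => p.2.foldl (fun d e => d.modify e.1 [] (· ++ [(p.1, e.2)])) d) events
  let data := (PySem.List.pyRange 0 n 1).foldl
    (fun d robot => d.insert robot (pvRow dropzone (events.getD robot []))) PySem.Dict.empty
  data.items

-- ===== PRECONDITION & SPEC =====
-- Pre_ excludes exactly the inputs where A raises: empty states (IndexError on states[0])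
-- and robot ids outside range(len(states[0])) (KeyError on data[robot]).
def Pre_gantt_values (states : List (List (Int × Int × Int × Int))) (dropzone : Int × Int) : Prop :=
  states ≠ [] ∧ ∀ st ∈ states, ∀ e ∈ st, 0 ≤ e.1 ∧ e.1 < ((states.headD []).length : Int)

instance (states : List (List (Int × Int × Int × Int))) (dropzone : Int × Int) :
    Decidable (Pre_gantt_values states dropzone) := by unfold Pre_gantt_values; infer_instance

def pvWitness_gantt_values : (List (List (Int × Int × Int × Int))) × (Int × Int) :=
  ([[(0, 1, 1, 5)], [(0, 2, 2, 5)], [(0, 0, 0, 5)]], (0, 0))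

def Spec_gantt_values (states : List (List (Int × Int × Int × Int))) (dropzone : Int × Int) (out : List (Int × List (List (Option Int)))) : Prop := out = gantt_values_alt states dropzone
instance (states : List (List (Int × Int × Int × Int))) (dropzone : Int × Int) (out : List (Int × List (List (Option Int)))) : Decidable (Spec_gantt_values states dropzone out) := by unfold Spec_gantt_values; infer_instance

-- ===== CLAIM (what is proved, stated in full; the proofs are below) =====
def Claim_equal_gantt_values : Prop := ∀ (states : List (List (Int × Int × Int × Int))) (dropzone : Int × Int), Dom_gantt_values states dropzone → Pre_gantt_values states dropzone → Spec_gantt_values states dropzone (gantt_values states dropzone)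

-- ===== LEMMAS AND PROOFS =====

-- a nested 'for index, state … for e in state' fold is the fold over the flattened event list
theorem pv_foldl_enum_flat {δ E : Type} (L : List (Int × List E)) (F : δ → Int → E → δ) (d : δ) :
    L.foldl (fun d p => p.2.foldl (fun d e => F d p.1 e) d) d
      = (L.flatMap (fun p => p.2.map (fun e => (p.1, e)))).foldl (fun d q => F d q.1 q.2) d := by
  induction L generalizing d with
  | nil => rfl
  | cons p L ih => simp [List.foldl_append, List.foldl_map, ih]

-- getD after a modify-loop keyed by 'key' = per-key fold over the filtered events
theorem pv_getD_foldl_modify_key {E ν : Type} (key : E → Int) (g : E → ν → ν) (d0 : ν) :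
    ∀ (l : List E) (d : PySem.Dict Int ν) (r : Int),
      (l.foldl (fun d e => d.modify (key e) d0 (g e)) d).getD r d0
        = (l.filter (fun e => key e == r)).foldl (fun v e => g e v) (d.getD r d0) := by
  intro l
  induction l with
  | nil => intro d r; rfl
  | cons e l ih =>
    intro d r
    rw [List.foldl_cons, ih]
    by_cases h : key e = r
    · simp [h, PySem.Dict.getD_modify]
    · simp [h, PySem.Dict.getD_modify, Ne.symm h]

theorem pv_getD_foldl_insert_const {ν : Type} (c : ν) :
    ∀ (l : List Int) (d : PySem.Dict Int ν) (r : Int), d.getD r c = c →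
      (l.foldl (fun d k => d.insert k c) d).getD r c = c := by
  intro l
  induction l with
  | nil => intro d r h; exact h
  | cons k l ih =>
    intro d r h
    rw [List.foldl_cons]
    apply ih
    rw [PySem.Dict.getD_insert]
    split <;> simp [h]

theorem pv_set_ofList_nodup : ∀ (l : List Int) (s : List Int), l.Nodup → (∀ x ∈ l, x ∉ s) →
    l.foldl PySem.Set.add s = s ++ l := by
  intro l
  induction l with
  | nil => intro s _ _; simp
  | cons x l ih =>
    intro s hnd hd
    rw [List.foldl_cons]
    have hx : PySem.Set.add s x = s ++ [x] := by
      simp [PySem.Set.add, PySem.Set.contains, hd x (by simp)]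
    rw [hx, ih (s ++ [x]) hnd.of_cons]
    · simp
    · intro y hy
      simp only [List.mem_append, List.mem_singleton]
      rintro (h | rfl)
      · exact hd y (by simp [hy]) h
      · exact (List.nodup_cons.mp hnd).1 hy

theorem pv_set_update_subset : ∀ (xs : List Int) (s : List Int), (∀ x ∈ xs, x ∈ s) →
    PySem.Set.update s xs = s := by
  intro xs
  induction xs with
  | nil => intro s _; rfl
  | cons x xs ih =>
    intro s h
    have : PySem.Set.add s x = s := by
      simp [PySem.Set.add, PySem.Set.contains, h x (by simp)]
    show (x :: xs).foldl PySem.Set.add s = s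
    rw [List.foldl_cons, this]
    exact ih s (fun y hy => h y (by simp [hy]))

theorem pvSetLast_append {α : Type} (f : α → α) :
    ∀ (l : List α) (x : α), pvSetLast (l ++ [x]) f = l ++ [f x] := by
  intro l
  induction l with
  | nil => intro x; rfl
  | cons a t ih =>
    intro x
    cases t with
    | nil => rfl
    | cons b u =>
      show a :: pvSetLast ((b :: u) ++ [x]) f = a :: ((b :: u) ++ [f x])
      rw [ih x]

-- single event: A's tail-mutation step equals B's accumulator step under the
-- representation v = done ++ pvOpt cur (with done = [] when no interval yet)
theorem pv_step_eq (dz : Int × Int) (e : Int × Int × Int × Int)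
    (done : List (List (Option Int))) (cur : Option (Int × Option Int × Int))
    (h : cur = none → done = []) :
    pvStepA dz e.1 e.2 (done ++ pvOpt cur)
        = (pvStepB dz (done, cur) e).1 ++ pvOpt (pvStepB dz (done, cur) e).2
      ∧ ((pvStepB dz (done, cur) e).2 = none → (pvStepB dz (done, cur) e).1 = []) := by
  cases cur with
  | none =>
    have hd : done = [] := h rfl
    subst hd
    refine ⟨?_, ?_⟩ <;> by_cases hz : (e.2.1, e.2.2.1) = dz <;>
      simp [pvStepA, pvStepB, pvOpt, pvCurList, hz]
  | some c =>
    have hvc : pvOpt (some c) = [pvCurList c] := rfl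
    have hlast : PySem.List.pyGetD (done ++ pvOpt (some c)) (-1) ([] : List (Option Int))
        = pvCurList c := by
      rw [hvc]; exact PySem.List.pyGetD_neg_one_append_singleton done (pvCurList c) []
    have hget1 : PySem.List.pyGetD (pvCurList c) 1 (none : Option Int) = c.2.1 := rfl
    have hlen : (done ++ pvOpt (some c)).length ≠ 0 := by simp [hvc]
    have hset1 : (pvCurList c).set 1 (some e.1) = pvCurList (c.1, some e.1, c.2.2) := rfl
    have hset2 : (pvCurList c).set 2 (some e.2.2.2) = pvCurList (c.1, c.2.1, e.2.2.2) := rfl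
    by_cases hz : (e.2.1, e.2.2.1) = dz
    · by_cases ht : pvTruthy c.2.1 = false
      · refine ⟨?_, by simp [pvStepB, hz, ht]⟩
        have hcond : (done ++ pvOpt (some c)).length ≠ 0 ∧
            pvTruthy (PySem.List.pyGetD (PySem.List.pyGetD (done ++ pvOpt (some c)) (-1)
              ([] : List (Option Int))) 1 (none : Option Int)) = false :=
          ⟨hlen, by rw [hlast, hget1]; exact ht⟩
        simp only [pvStepA]
        rw [if_pos hz, if_pos hcond, hvc, pvSetLast_append, hset1]
        simp [pvStepB, hz, ht, pvOpt]
      · have ht' : pvTruthy c.2.1 = true := by revert ht; cases pvTruthy c.2.1 <;> simp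
        refine ⟨?_, by simp [pvStepB, hz, ht]⟩
        simp only [pvStepA]
        rw [if_pos hz, if_neg (by rintro ⟨-, hc⟩; rw [hlast, hget1] at hc; simp [ht'] at hc)]
        simp [pvStepB, hz, ht]
    · by_cases ht : pvTruthy c.2.1 = true
      · refine ⟨?_, by simp [pvStepB, hz, ht]⟩
        have hcond : (done ++ pvOpt (some c)).length = 0 ∨
            ((done ++ pvOpt (some c)).length ≠ 0 ∧
             pvTruthy (PySem.List.pyGetD (PySem.List.pyGetD (done ++ pvOpt (some c)) (-1)
               ([] : List (Option Int))) 1 (none : Option Int)) = true) :=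
          Or.inr ⟨hlen, by rw [hlast, hget1]; exact ht⟩
        simp only [pvStepA]
        rw [if_neg hz, if_pos hcond]
        simp [pvStepB, hz, ht, pvOpt, pvCurList]
      · have ht' : pvTruthy c.2.1 = false := by revert ht; cases pvTruthy c.2.1 <;> simp
        refine ⟨?_, by simp [pvStepB, hz, ht]⟩
        simp only [pvStepA]
        rw [if_neg hz, if_neg (by
              rintro (h0 | ⟨-, hc⟩)
              · exact hlen h0
              · rw [hlast, hget1] at hc; simp [ht'] at hc),
            hvc, pvSetLast_append, hset2]
        simp [pvStepB, hz, ht', pvOpt]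

-- the whole per-robot loop: A's list fold equals B's (done, cur) fold
theorem pv_core (dz : Int × Int) :
    ∀ (l : List (Int × Int × Int × Int)) (done : List (List (Option Int)))
      (cur : Option (Int × Option Int × Int)), (cur = none → done = []) →
      l.foldl (fun v e => pvStepA dz e.1 e.2 v) (done ++ pvOpt cur)
          = (l.foldl (pvStepB dz) (done, cur)).1 ++ pvOpt (l.foldl (pvStepB dz) (done, cur)).2
        ∧ ((l.foldl (pvStepB dz) (done, cur)).2 = none → (l.foldl (pvStepB dz) (done, cur)).1 = []) := by
  intro l
  induction l with
  | nil => intro done cur h; exact ⟨rfl, h⟩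
  | cons e l ih =>
    intro done cur h
    obtain ⟨h1, h2⟩ := pv_step_eq dz e done cur h
    rw [List.foldl_cons, List.foldl_cons, h1]
    have := ih (pvStepB dz (done, cur) e).1 (pvStepB dz (done, cur) e).2 h2
    simpa using this

-- keys of the initial '{robot: [] for robot in range(n)}' dict
theorem pv_keys_init {ν : Type} (c : ν) (a b : Int) :
    ((PySem.List.pyRange a b 1).foldl (fun d r => d.insert r c) PySem.Dict.empty).keys
      = PySem.List.pyRange a b 1 := by
  rw [PySem.Dict.keys_foldl_insert (f := fun _ _ => c)]
  show (PySem.List.pyRange a b 1).foldl PySem.Set.add (PySem.Dict.empty (κ := Int) (ν := ν)).keys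
      = PySem.List.pyRange a b 1
  rw [show (PySem.Dict.empty (κ := Int) (ν := ν)).keys = [] from rfl,
      pv_set_ofList_nodup _ _ (PySem.List.nodup_pyRange_one a b) (by simp)]
  simp

-- the core per-robot equality, lifted to the whole claim
theorem pv_main (states : List (List (Int × Int × Int × Int))) (dz : Int × Int)
    (hb : ∀ q ∈ (PySem.List.enumerate states).flatMap (fun p => p.2.map (fun e => (p.1, e))),
      q.2.1 ∈ PySem.List.pyRange 0
        (((PySem.List.pyGetD states 0 ([] : List (Int × Int × Int × Int))).length : Int)) 1) :
    gantt_values states dz = gantt_values_alt states dz := by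
  simp only [gantt_values, gantt_values_alt]
  rw [pv_foldl_enum_flat (E := Int × Int × Int × Int)
        (F := fun d i e => PySem.Dict.modify d e.1 [] (pvStepA dz i e.2)),
      pv_foldl_enum_flat (E := Int × Int × Int × Int)
        (F := fun d i e => PySem.Dict.modify d e.1 [] (· ++ [(i, e.2)]))]
  set n : Int := ((PySem.List.pyGetD states 0 ([] : List (Int × Int × Int × Int))).length : Int) with hn
  set R := PySem.List.pyRange 0 n 1 with hRdef
  set evs := (PySem.List.enumerate states).flatMap (fun p => p.2.map (fun e => (p.1, e))) with hevs
  set d0A : PySem.Dict Int (List (List (Option Int))) :=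
    R.foldl (fun d r => d.insert r []) PySem.Dict.empty with hd0A
  set dA := evs.foldl (fun d q => d.modify q.2.1 [] (pvStepA dz q.1 q.2.2)) d0A with hdA
  set d0E : PySem.Dict Int (List (Int × Int × Int × Int)) :=
    R.foldl (fun d r => d.insert r []) PySem.Dict.empty with hd0E
  set dE := evs.foldl (fun d q => d.modify q.2.1 [] (· ++ [(q.1, q.2.2)])) d0E with hdE
  -- keys of A's result
  have hk0 : d0A.keys = R := pv_keys_init _ 0 n
  have hkA : dA.keys = R := by
    rw [hdA, PySem.Dict.keys_foldl_modify_key (key := fun q : Int × Int × Int × Int × Int => q.2.1)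
          (f := fun _ (q : Int × Int × Int × Int × Int) => pvStepA dz q.1 q.2.2), hk0]
    apply pv_set_update_subset
    intro x hx
    simp only [List.mem_map] at hx
    obtain ⟨q, hq, rfl⟩ := hx
    exact hb q hq
  have hndA : dA.keys.Nodup := by rw [hkA]; exact PySem.List.nodup_pyRange_one 0 n
  -- A's items
  rw [PySem.Dict.items_eq_map_keys dA hndA [], hkA]
  -- B's items
  rw [PySem.Dict.items_foldl_insert_fresh (d := PySem.Dict.empty) (l := R) (k := fun r => r)
        (v := fun r => pvRow dz (dE.getD r [])) (by simp)
        (by rw [hRdef]; simpa using PySem.List.nodup_pyRange_one 0 n)]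
  rw [show (PySem.Dict.empty (κ := Int) (ν := List (List (Option Int)))).items = [] from rfl]
  simp only [List.nil_append]
  -- pointwise over the robots
  refine List.map_congr_left (fun r _ => ?_)
  have hA : dA.getD r [] = (evs.filter (fun q => q.2.1 == r)).foldl
      (fun v q => pvStepA dz q.1 q.2.2 v) [] := by
    rw [hdA, pv_getD_foldl_modify_key (key := fun q : Int × Int × Int × Int × Int => q.2.1)
          (g := fun q : Int × Int × Int × Int × Int => pvStepA dz q.1 q.2.2)]
    congr 1
    exact pv_getD_foldl_insert_const [] R PySem.Dict.empty r rfl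
  have hE : dE.getD r [] = (evs.filter (fun q => q.2.1 == r)).map (fun q => (q.1, q.2.2)) := by
    rw [hdE, pv_getD_foldl_modify_key (key := fun q : Int × Int × Int × Int × Int => q.2.1)
          (g := fun (q : Int × Int × Int × Int × Int) v => v ++ [(q.1, q.2.2)]),
        pv_getD_foldl_insert_const [] R PySem.Dict.empty r rfl,
        PySem.List.foldl_append_singleton_eq_map]
    simp
  rw [hA, hE]
  have hc := (pv_core dz ((evs.filter (fun q => q.2.1 == r)).map
      (fun q : Int × Int × Int × Int × Int => (q.1, q.2.2))) [] none (fun _ => rfl)).1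
  simp only [List.foldl_map, List.nil_append] at hc
  simp only [pvRow, List.foldl_map]
  refine congrArg (Prod.mk r) ?_
  simpa [pvOpt] using hc

-- ===== VERDICT (by name: the statement is the Claim_ definition above) =====
theorem gantt_values_spec : Claim_equal_gantt_values := by
  intro states dz _ hPre
  obtain ⟨hne, hbound⟩ := hPre
  show gantt_values states dz = gantt_values_alt states dz
  apply pv_main
  intro q hq
  obtain ⟨s0, t, rfl⟩ : ∃ s0 t, states = s0 :: t := by
    cases states with
    | nil => exact absurd rfl hne
    | cons a t => exact ⟨a, t, rfl⟩
  simp only [List.mem_flatMap, List.mem_map] at hq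
  obtain ⟨p, hp, e, he, rfl⟩ := hq
  have hst : p.2 ∈ s0 :: t := by
    rw [PySem.List.mem_enumerate_iff] at hp
    obtain ⟨k, hk, rfl⟩ := hp
    exact List.getElem_mem hk
  have := hbound p.2 hst e he
  rw [PySem.List.mem_pyRange_one]
  simpa [PySem.List.pyGetD_zero_cons] using this
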